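-- pv_equiv track=rewrite | github.com/seame12/backjoon-study | 프로그래머스/1/82612. 부족한 금액 계산하기/부족한 금액 계산하기.py | solution
-- ===== SOURCE A (Python) =====
-- def solution(price, money, count):
--     answer = 0
--     a=0
--     for i in range(1,count+1):
--         a=a+i
--     price=price*a
--     if price-money>0:
--         return abs(money-price)
--     else:
--         return 0
-- ===== SOURCE B (Python) =====
-- def solution(price, money, count):
--     n = count if count > 0 else 0
--     total = price * (n * (n + 1) // 2)
--     shortfall = total - money
--     return shortfall if shortfall > 0 else 0
-- ===== Notes on version B (the rewrite author's own statement) =====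
-- stated objective: faster
-- what changed: Replaced the O(count) accumulation loop with the closed-form arithmetic-series formula n*(n+1)/2.
import Mathlib
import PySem

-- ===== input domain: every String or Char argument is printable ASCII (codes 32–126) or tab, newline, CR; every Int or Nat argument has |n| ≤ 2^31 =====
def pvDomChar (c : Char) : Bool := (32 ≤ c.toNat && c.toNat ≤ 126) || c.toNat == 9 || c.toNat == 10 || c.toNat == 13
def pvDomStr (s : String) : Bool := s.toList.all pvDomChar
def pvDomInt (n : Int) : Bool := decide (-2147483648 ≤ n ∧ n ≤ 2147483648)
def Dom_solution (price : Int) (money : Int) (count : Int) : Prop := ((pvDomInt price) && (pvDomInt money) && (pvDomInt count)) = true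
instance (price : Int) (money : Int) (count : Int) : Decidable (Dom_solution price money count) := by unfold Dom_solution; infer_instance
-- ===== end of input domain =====

-- B replaces A's O(count) summation loop with the closed-form n*(n+1)//2 (objective: faster).


-- ===== PORT A =====
def solution (price : Int) (money : Int) (count : Int) : Int :=
  let a := (PySem.List.pyRange 1 (count + 1) 1).foldl (fun a i => a + i) 0
  let price := price * a
  if price - money > 0 then (money - price).natAbs else 0

-- ===== PORT B =====
def solution_alt (price : Int) (money : Int) (count : Int) : Int :=
  let n : Int := if count > 0 then count else 0
  let total := price * (PySem.Int.floordiv (n * (n + 1)) 2)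
  let shortfall := total - money
  if shortfall > 0 then shortfall else 0

-- ===== PRECONDITION & SPEC =====
def Spec_solution (price : Int) (money : Int) (count : Int) (out : Int) : Prop := out = solution_alt price money count
instance (price : Int) (money : Int) (count : Int) (out : Int) : Decidable (Spec_solution price money count out) := by unfold Spec_solution; infer_instance

-- ===== CLAIM (what is proved, stated in full; the proofs are below) =====
def Claim_equal_solution : Prop := ∀ (price : Int) (money : Int) (count : Int), Dom_solution price money count → Spec_solution price money count (solution price money count)

-- ===== LEMMAS AND PROOFS =====

-- ===== VERDICT (by name: the statement is the Claim_ definition above) =====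
-- the loop's running sum over range(1, n+1) equals the closed-form floor-division formula
theorem pv_sum_range (n : Nat) :
    ((PySem.List.pyRange 1 ((n : Int) + 1) 1).foldl (fun a i => a + i) 0)
      = PySem.Int.floordiv ((n : Int) * ((n : Int) + 1)) 2 := by
  induction n with
  | zero => simp [PySem.List.pyRange_one_eq_nil, PySem.Int.floordiv]
  | succ k ih =>
    have h : (1 : Int) ≤ (k : Int) + 1 := by omega
    rw [show ((k + 1 : Nat) : Int) + 1 = ((k : Int) + 1) + 1 by push_cast; ring,
        PySem.List.pyRange_one_succ_right h, List.foldl_append, ih]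
    simp only [List.foldl, PySem.Int.floordiv, Int.fdiv_eq_ediv]
    have e1 : 2 * ((k : Int) * ((k : Int) + 1) / 2) = (k : Int) * ((k : Int) + 1) :=
      Int.mul_ediv_cancel' (Int.even_mul_succ_self (k : Int)).two_dvd
    have e2 : 2 * (((k : Int) + 1) * (((k : Int) + 1) + 1) / 2)
        = ((k : Int) + 1) * (((k : Int) + 1) + 1) :=
      Int.mul_ediv_cancel' (Int.even_mul_succ_self ((k : Int) + 1)).two_dvd
    have e3 : ((k : Int) + 1) * (((k : Int) + 1) + 1)
        = (k : Int) * ((k : Int) + 1) + 2 * ((k : Int) + 1) := by ring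
    push_cast
    omega

theorem solution_spec : Claim_equal_solution := by
  intro price money count _
  unfold Spec_solution solution solution_alt
  by_cases hc : count > 0
  · obtain ⟨n, hn⟩ : ∃ n : Nat, count = (n : Int) :=
      ⟨count.toNat, (Int.toNat_of_nonneg (le_of_lt hc)).symm⟩
    subst hn
    simp only [if_pos hc]
    rw [pv_sum_range n]
    generalize price * PySem.Int.floordiv ((n : Int) * ((n : Int) + 1)) 2 = t
    split_ifs <;> omega
  · have hle : count + 1 ≤ 1 := by omega
    rw [PySem.List.pyRange_one_eq_nil hle]
    simp only [List.foldl_nil, if_neg hc, PySem.Int.floordiv, zero_mul, mul_zero,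
      zero_add, Int.zero_fdiv]
    split_ifs <;> omega
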